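-- pv_equiv track=rewrite | github.com/CZboop/Challenges-and-Interview-Question-Practice | codesignal/python/Metro Card.py | solution
-- ===== SOURCE A (Python) =====
-- def solution(lastNumberOfDays):
--     days = []
--     months = [31, 28, 31, 30, 31, 30, 31, 31, 30, 31, 30, 31]
--     for c,v in enumerate(months[:-1]):
--         if v == lastNumberOfDays:
--             days.append(months[c+1])
--     days_new = []
--     for i in days:
--         if i not in days_new:
--             days_new.append(i)
--     return days_new
-- ===== SOURCE B (Python) =====
-- def solution(lastNumberOfDays):
--     months = [31, 28, 31, 30, 31, 30, 31, 31, 30, 31, 30, 31]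
--     mapping = {}
--     for a, b in zip(months, months[1:]):
--         bucket = mapping.setdefault(a, [])
--         if b not in bucket:
--             bucket.append(b)
--     return mapping.get(lastNumberOfDays, [])
-- ===== Notes on version B (the rewrite author's own statement) =====
-- stated objective: idiomatic
-- what changed: B builds the complete next-month index once by folding over adjacent pairs (zip) into a dict of ordered-deduped buckets and answers with a single dict lookup, instead of A's per-call filter pass followed by a separate dedup pass.
import Mathlib
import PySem

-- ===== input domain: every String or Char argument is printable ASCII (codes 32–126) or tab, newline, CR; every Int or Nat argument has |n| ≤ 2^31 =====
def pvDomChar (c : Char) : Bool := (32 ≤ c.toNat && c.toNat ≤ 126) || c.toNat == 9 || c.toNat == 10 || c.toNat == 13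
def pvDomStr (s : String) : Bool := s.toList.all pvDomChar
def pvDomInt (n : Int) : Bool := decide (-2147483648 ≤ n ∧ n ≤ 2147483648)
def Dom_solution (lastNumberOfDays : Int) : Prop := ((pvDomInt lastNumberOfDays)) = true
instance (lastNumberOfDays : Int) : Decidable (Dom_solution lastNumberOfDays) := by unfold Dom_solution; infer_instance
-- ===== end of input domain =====

-- B builds the next-month index once (ordered-dedup buckets keyed by month length) and answers by one dict lookup; objective: more idiomatic, same behaviour.


-- ===== PORT A =====
def solution (lastNumberOfDays : Int) : List Int :=
  let months : List Int := [31, 28, 31, 30, 31, 30, 31, 31, 30, 31, 30, 31]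
  -- for c, v in enumerate(months[:-1]): if v == lastNumberOfDays: days.append(months[c+1])
  let days : List Int :=
    (PySem.List.enumerate (PySem.List.slice months none (some (-1)))).foldl
      (fun acc cv =>
        if cv.2 == lastNumberOfDays then
          match PySem.List.pyGet? months (cv.1 + 1) with  -- months[c+1]; always in range here
          | some x => acc ++ [x]
          | none => acc
        else acc) []
  -- second pass: ordered dedup
  days.foldl (fun dn i => if dn.contains i then dn else dn ++ [i]) []

-- ===== PORT B =====
def solution_alt (lastNumberOfDays : Int) : List Int :=
  let months : List Int := [31, 28, 31, 30, 31, 30, 31, 31, 30, 31, 30, 31]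
  -- mapping: dict of ordered-deduped buckets, built over zip(months, months[1:])
  let mapping : PySem.Dict Int (List Int) :=
    (months.zip months.tail).foldl
      (fun m ab =>
        let bucket := m.getD ab.1 []       -- setdefault(a, []) read
        let bucket' := if bucket.contains ab.2 then bucket else bucket ++ [ab.2]
        m.insert ab.1 bucket')             -- overwrite in place (setdefault + in-place append)
      PySem.Dict.empty
  mapping.getD lastNumberOfDays []

-- ===== PRECONDITION & SPEC =====
def Spec_solution (lastNumberOfDays : Int) (out : List Int) : Prop := out = solution_alt lastNumberOfDays
instance (lastNumberOfDays : Int) (out : List Int) : Decidable (Spec_solution lastNumberOfDays out) := by unfold Spec_solution; infer_instance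

-- ===== CLAIM (what is proved, stated in full; the proofs are below) =====
def Claim_equal_solution : Prop := ∀ (lastNumberOfDays : Int), Dom_solution lastNumberOfDays → Spec_solution lastNumberOfDays (solution lastNumberOfDays)

-- ===== LEMMAS AND PROOFS =====
-- The only month lengths appearing in the table are 28, 30, 31; on every other input both sides return [].
lemma solution_off (d : Int) (h28 : d ≠ 28) (h30 : d ≠ 30) (h31 : d ≠ 31) :
    solution d = solution_alt d := by
  simp [solution, solution_alt, PySem.List.enumerate, PySem.List.slice,
    PySem.Dict.getD, PySem.Dict.get?, PySem.Dict.insert, PySem.Dict.empty,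
    PySem.List.pyGet?, PySem.List.pyIdx?, beq_iff_eq, h28, h30, Ne.symm h28, Ne.symm h30, Ne.symm h31]

-- ===== VERDICT (by name: the statement is the Claim_ definition above) =====
theorem solution_spec : Claim_equal_solution := by
  intro d _
  unfold Spec_solution
  by_cases h28 : d = 28
  · subst h28; decide
  by_cases h30 : d = 30
  · subst h30; decide
  by_cases h31 : d = 31
  · subst h31; decide
  exact solution_off d h28 h30 h31
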